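-- pv_equiv track=rewrite | github.com/S1lash/minder-ztn | zettelkasten/_system/scripts/lint_concept_audit.py | apply_concept_aliases
-- ===== SOURCE A (Python) =====
-- def apply_concept_aliases(
--     fm: dict, alias_map: dict[str, str]
-- ) -> tuple[dict, list[dict]]:
--     """Rewrite `concepts:` entries via alias_map (old → canonical).
--
--     Pure function. Idempotent on the canonical form: if an entry is
--     already canonical, no change. Dedup preserved on collisions
--     (two aliases pointing to the same canonical → single entry).
--
--     Emits `concept-alias-rewrite-autofix` events per rewrite.
--     """
--     events: list[dict] = []
--     if not alias_map:
--         return fm, events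
--     raw = fm.get("concepts")
--     if not isinstance(raw, list):
--         return fm, events
--     rewritten: list[str] = []
--     seen: set[str] = set()
--     changed = False
--     for entry in raw:
--         if not isinstance(entry, str):
--             rewritten.append(entry)
--             continue
--         target = alias_map.get(entry)
--         if target is None:
--             if entry not in seen:
--                 seen.add(entry)
--                 rewritten.append(entry)
--             continue
--         changed = True
--         events.append({
--             "fix_id": "concept-alias-rewrite-autofix",
--             "field": "concepts",
--             "raw": entry,
--             "result": target,
--         })
--         if target not in seen:
--             seen.add(target)
--             rewritten.append(target)
--     if not changed:
--         return fm, events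
--     new_fm = dict(fm)
--     new_fm["concepts"] = rewritten
--     return new_fm, events
-- ===== SOURCE B (Python) =====
-- def apply_concept_aliases(fm, alias_map):
--     """Two-pass rewrite: pass 1 maps entries to final values and collects
--     events; pass 2 dedups string items. Original fm returned if no event."""
--     if not alias_map:
--         return fm, []
--     raw = fm.get("concepts")
--     if not isinstance(raw, list):
--         return fm, []
--     finals = []
--     events = []
--     for entry in raw:
--         if not isinstance(entry, str):
--             finals.append(entry)
--             continue
--         target = alias_map.get(entry)
--         if target is None:
--             finals.append(entry)
--         else:
--             events.append({
--                 "fix_id": "concept-alias-rewrite-autofix",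
--                 "field": "concepts",
--                 "raw": entry,
--                 "result": target,
--             })
--             finals.append(target)
--     if not events:
--         return fm, events
--     rewritten = []
--     seen = set()
--     for item in finals:
--         if not isinstance(item, str):
--             rewritten.append(item)
--         elif item not in seen:
--             seen.add(item)
--             rewritten.append(item)
--     new_fm = dict(fm)
--     new_fm["concepts"] = rewritten
--     return new_fm, events
-- ===== Notes on version B (the rewrite author's own statement) =====
-- stated objective: alternative
-- what changed: A's single loop that interleaves alias lookup, event emission and seen-set dedup is split into two sequential passes: pass 1 maps each entry to its final value while collecting events, pass 2 dedups the resulting list; 'changed' flag replaced by testing whether any event was emitted.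
import Mathlib
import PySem

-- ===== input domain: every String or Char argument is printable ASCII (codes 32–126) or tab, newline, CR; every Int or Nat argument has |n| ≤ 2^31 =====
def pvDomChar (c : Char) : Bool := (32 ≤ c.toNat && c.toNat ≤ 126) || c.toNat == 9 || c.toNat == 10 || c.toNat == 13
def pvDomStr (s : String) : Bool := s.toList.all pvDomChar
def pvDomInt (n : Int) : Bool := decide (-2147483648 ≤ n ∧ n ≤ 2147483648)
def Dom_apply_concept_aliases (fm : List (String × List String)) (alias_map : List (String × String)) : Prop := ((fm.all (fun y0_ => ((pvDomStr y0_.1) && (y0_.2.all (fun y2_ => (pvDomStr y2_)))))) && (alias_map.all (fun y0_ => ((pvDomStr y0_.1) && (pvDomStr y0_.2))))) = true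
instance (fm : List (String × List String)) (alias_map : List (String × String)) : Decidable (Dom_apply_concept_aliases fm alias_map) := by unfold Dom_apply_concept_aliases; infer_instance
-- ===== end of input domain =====

-- B splits A's single interleaved rewrite+dedup loop into two sequential passes
-- (rewrite/collect events, then dedup), for clarity; same return value (objective: simpler decomposition, no speed claim).

-- the event dict emitted per rewrite (shared literal)
def pvEvent (entry target : String) : List (String × String) :=
  [("fix_id", "concept-alias-rewrite-autofix"), ("field", "concepts"),
   ("raw", entry), ("result", target)]

-- ===== PORT A =====
-- A's single loop over raw with state (rewritten, seen, changed, events).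
-- (Under the typed domain every entry of raw is a string, so Python's
-- 'not isinstance(entry, str)' branch can never fire and is omitted.)
def pvALoop (alias_map : List (String × String)) :
    List String → List String → PySem.Set String → Bool → List (List (String × String)) →
    List String × PySem.Set String × Bool × List (List (String × String))
  | [], rew, seen, changed, events => (rew, seen, changed, events)
  | entry :: rest, rew, seen, changed, events =>
    match (PySem.Dict.mk alias_map).get? entry with
    | none =>
      if PySem.Set.contains seen entry then
        pvALoop alias_map rest rew seen changed events
      else
        pvALoop alias_map rest (rew ++ [entry]) (PySem.Set.add seen entry) changed events
    | some target =>
      if PySem.Set.contains seen target then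
        pvALoop alias_map rest rew seen true (events ++ [pvEvent entry target])
      else
        pvALoop alias_map rest (rew ++ [target]) (PySem.Set.add seen target) true
          (events ++ [pvEvent entry target])

def apply_concept_aliases (fm : List (String × List String)) (alias_map : List (String × String)) : (List (String × List String)) × (List (List (String × String))) :=
  if alias_map = [] then (fm, [])
  else
    match (PySem.Dict.mk fm).get? "concepts" with
    | none => (fm, [])  -- fm has no 'concepts' key ('raw' is not a list)
    | some raw =>
      let r := pvALoop alias_map raw [] PySem.Set.empty false []
      if r.2.2.1 = false then (fm, r.2.2.2)
      else (((PySem.Dict.mk fm).insert "concepts" r.1).items, r.2.2.2)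

-- ===== PORT B =====
-- pass 1: map entries to final values, collect events
def pvStep1 (alias_map : List (String × String))
    (s : List String × List (List (String × String))) (entry : String) :
    List String × List (List (String × String)) :=
  match (PySem.Dict.mk alias_map).get? entry with
  | none => (s.1 ++ [entry], s.2)
  | some target => (s.1 ++ [target], s.2 ++ [pvEvent entry target])

-- pass 2: dedup via a seen set
def pvStep2 (s : List String × PySem.Set String) (item : String) :
    List String × PySem.Set String :=
  if PySem.Set.contains s.2 item then s else (s.1 ++ [item], PySem.Set.add s.2 item)

def apply_concept_aliases_alt (fm : List (String × List String)) (alias_map : List (String × String)) : (List (String × List String)) × (List (List (String × String))) :=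
  if alias_map = [] then (fm, [])
  else
    match (PySem.Dict.mk fm).get? "concepts" with
    | none => (fm, [])
    | some raw =>
      let p := raw.foldl (pvStep1 alias_map) ([], [])
      if p.2 = [] then (fm, p.2)
      else
        (((PySem.Dict.mk fm).insert "concepts"
            (p.1.foldl pvStep2 ([], PySem.Set.empty)).1).items, p.2)

-- ===== PRECONDITION & SPEC =====
def Spec_apply_concept_aliases (fm : List (String × List String)) (alias_map : List (String × String)) (out : (List (String × List String)) × (List (List (String × String)))) : Prop := out = apply_concept_aliases_alt fm alias_map
instance (fm : List (String × List String)) (alias_map : List (String × String)) (out : (List (String × List String)) × (List (List (String × String)))) : Decidable (Spec_apply_concept_aliases fm alias_map out) := by unfold Spec_apply_concept_aliases; infer_instance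

-- ===== CLAIM (what is proved, stated in full; the proofs are below) =====
def Claim_equal_apply_concept_aliases : Prop := ∀ (fm : List (String × List String)) (alias_map : List (String × String)), Dom_apply_concept_aliases fm alias_map → Spec_apply_concept_aliases fm alias_map (apply_concept_aliases fm alias_map)

-- ===== LEMMAS AND PROOFS =====

-- pass-1 fold commutes with its accumulators (both components only grow by appends)
theorem pvStep1_shift (am : List (String × String)) :
    ∀ (raw : List String) (f : List String) (ev : List (List (String × String))),
      raw.foldl (pvStep1 am) (f, ev) =
        (f ++ (raw.foldl (pvStep1 am) ([], [])).1, ev ++ (raw.foldl (pvStep1 am) ([], [])).2) := by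
  intro raw
  induction raw with
  | nil => intro f ev; simp [List.foldl]
  | cons e rest ih =>
    intro f ev
    cases hg : (PySem.Dict.mk am).get? e with
    | none =>
      simp only [List.foldl_cons, pvStep1, hg]
      rw [ih (f ++ [e]) ev, ih ([] ++ [e]) []]
      simp
    | some t =>
      simp only [List.foldl_cons, pvStep1, hg]
      rw [ih (f ++ [t]) (ev ++ [pvEvent e t]), ih ([] ++ [t]) ([] ++ [pvEvent e t])]
      simp

-- A's single loop equals B's two passes composed, for any starting state
theorem pvLoop_eq (am : List (String × String)) :
    ∀ (raw rew : List String) (seen : PySem.Set String) (changed : Bool)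
      (events : List (List (String × String))),
      pvALoop am raw rew seen changed events =
        ((((raw.foldl (pvStep1 am) ([], [])).1).foldl pvStep2 (rew, seen)).1,
         (((raw.foldl (pvStep1 am) ([], [])).1).foldl pvStep2 (rew, seen)).2,
         changed || !(raw.foldl (pvStep1 am) ([], [])).2.isEmpty,
         events ++ (raw.foldl (pvStep1 am) ([], [])).2) := by
  intro raw
  induction raw with
  | nil => intro rew seen changed events; simp [pvALoop, List.foldl]
  | cons e rest ih =>
    intro rew seen changed events
    have hshift := pvStep1_shift am rest
    cases hg : (PySem.Dict.mk am).get? e with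
    | none =>
      rw [show (e :: rest).foldl (pvStep1 am) ([], []) = rest.foldl (pvStep1 am) ([e], []) from by
        simp [List.foldl_cons, pvStep1, hg]]
      rw [hshift [e] []]
      simp only [pvALoop, hg, List.nil_append, List.singleton_append, List.foldl_cons]
      by_cases hc : PySem.Set.contains seen e = true
      · rw [if_pos hc, show pvStep2 (rew, seen) e = (rew, seen) from by simp only [pvStep2]; rw [if_pos hc], ih]
      · rw [if_neg hc,
          show pvStep2 (rew, seen) e = (rew ++ [e], PySem.Set.add seen e) from by simp only [pvStep2]; rw [if_neg hc],
          ih]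
    | some t =>
      rw [show (e :: rest).foldl (pvStep1 am) ([], []) = rest.foldl (pvStep1 am) ([t], [pvEvent e t]) from by
        simp [List.foldl_cons, pvStep1, hg]]
      rw [hshift [t] [pvEvent e t]]
      simp only [pvALoop, hg, List.singleton_append, List.foldl_cons]
      by_cases hc : PySem.Set.contains seen t = true
      · rw [if_pos hc, show pvStep2 (rew, seen) t = (rew, seen) from by simp only [pvStep2]; rw [if_pos hc], ih]
        simp
      · rw [if_neg hc,
          show pvStep2 (rew, seen) t = (rew ++ [t], PySem.Set.add seen t) from by simp only [pvStep2]; rw [if_neg hc],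
          ih]
        simp

-- ===== VERDICT (by name: the statement is the Claim_ definition above) =====
theorem apply_concept_aliases_spec : Claim_equal_apply_concept_aliases := by
  intro fm alias_map _
  unfold Spec_apply_concept_aliases apply_concept_aliases apply_concept_aliases_alt
  by_cases ham : alias_map = []
  · simp [ham]
  · simp only [ham, if_false]
    cases hg : (PySem.Dict.mk fm).get? "concepts" with
    | none => rfl
    | some raw =>
      simp only []
      rw [pvLoop_eq alias_map raw [] PySem.Set.empty false []]
      simp only [Bool.false_or, List.nil_append]
      cases hev : (raw.foldl (pvStep1 alias_map) ([], [])).2 with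
      | nil => simp [hev]
      | cons x xs => simp [hev]
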